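-- pv_equiv track=rewrite | github.com/d14405011-sudo/2026-python | weeks/week-10/solutions/1114405011/10252/q10252.py | one_dim_min_and_count
-- ===== SOURCE A (Python) =====
-- from typing import List, Tuple
--
-- def one_dim_min_and_count(vals: List[int]) -> Tuple[int, int]:
--     """回傳一維最小距離和，以及能達到最小值的整數點個數。"""
--     vals = sorted(vals)
--     n = len(vals)
--
--     lo = vals[(n - 1) // 2]
--     hi = vals[n // 2]
--
--     # 在 [lo, hi] 區間內任取整數都可達最小值；取 lo 來計算最小和即可
--     min_sum = sum(abs(v - lo) for v in vals)
--     count = hi - lo + 1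
--     return min_sum, count
-- ===== SOURCE B (Python) =====
-- from typing import List, Tuple
--
-- def one_dim_min_and_count(vals: List[int]) -> Tuple[int, int]:
--     """Min sum of |v - p| over integer p, and how many integer p attain it."""
--     s = sorted(vals)
--     n = len(s)
--     # The minimal sum equals (sum of the upper half) - (sum of the lower half):
--     # no median is subtracted and no abs is taken.
--     min_sum = sum(s[(n + 1) // 2:]) - sum(s[:n // 2])
--     count = s[n // 2] - s[(n - 1) // 2] + 1
--     return min_sum, count
-- ===== Notes on version B (the rewrite author's own statement) =====
-- stated objective: alternative
-- what changed: Replaces A's per-element |v - median| accumulation with the half-sum identity min_sum = sum(upper-half slice) - sum(lower-half slice): no median subtraction, no abs, no Python-level loop after sorting.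
import Mathlib
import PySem

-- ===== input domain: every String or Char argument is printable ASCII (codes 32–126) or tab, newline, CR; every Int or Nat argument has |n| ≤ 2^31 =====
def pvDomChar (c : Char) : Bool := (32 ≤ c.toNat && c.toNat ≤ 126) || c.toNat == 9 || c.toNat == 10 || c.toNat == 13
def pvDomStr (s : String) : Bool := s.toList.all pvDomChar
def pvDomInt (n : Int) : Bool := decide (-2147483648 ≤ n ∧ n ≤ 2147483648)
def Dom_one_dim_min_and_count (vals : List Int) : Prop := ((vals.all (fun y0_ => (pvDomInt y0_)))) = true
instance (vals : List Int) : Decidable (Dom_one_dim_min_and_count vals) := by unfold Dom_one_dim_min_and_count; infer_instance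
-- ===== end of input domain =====

-- B replaces A's per-element |v - median| accumulation with the half-sum identity
-- min_sum = sum(upper half) - sum(lower half) on two slices (objective: alternative).


-- ===== PORT A =====
def one_dim_min_and_count (vals : List Int) : Int × Int :=
  let s := PySem.List.sorted vals (fun x => x) false
  let n : Int := s.length
  let lo := PySem.List.pyGetD s (PySem.Int.floordiv (n - 1) 2) 0
  let hi := PySem.List.pyGetD s (PySem.Int.floordiv n 2) 0
  let min_sum := s.foldl (fun acc v => acc + |v - lo|) 0
  let count := hi - lo + 1
  (min_sum, count)

-- ===== PORT B =====
def one_dim_min_and_count_alt (vals : List Int) : Int × Int :=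
  let s := PySem.List.sorted vals (fun x => x) false
  let n : Int := s.length
  let min_sum := (PySem.List.slice s (some (PySem.Int.floordiv (n + 1) 2)) none).sum
                 - (PySem.List.slice s none (some (PySem.Int.floordiv n 2))).sum
  let count := PySem.List.pyGetD s (PySem.Int.floordiv n 2) 0
               - PySem.List.pyGetD s (PySem.Int.floordiv (n - 1) 2) 0 + 1
  (min_sum, count)

-- ===== PRECONDITION & SPEC =====
-- A raises IndexError on the empty list (vals[(n-1)//2] with n = 0); excluded.
def Pre_one_dim_min_and_count (vals : List Int) : Prop := vals ≠ []
instance (vals : List Int) : Decidable (Pre_one_dim_min_and_count vals) := by unfold Pre_one_dim_min_and_count; infer_instance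
def pvWitness_one_dim_min_and_count : List Int := [3, -1, 2]

def Spec_one_dim_min_and_count (vals : List Int) (out : Int × Int) : Prop := out = one_dim_min_and_count_alt vals
instance (vals : List Int) (out : Int × Int) : Decidable (Spec_one_dim_min_and_count vals out) := by unfold Spec_one_dim_min_and_count; infer_instance

-- ===== CLAIM (what is proved, stated in full; the proofs are below) =====
def Claim_equal_one_dim_min_and_count : Prop := ∀ (vals : List Int), Dom_one_dim_min_and_count vals → Pre_one_dim_min_and_count vals → Spec_one_dim_min_and_count vals (one_dim_min_and_count vals)

-- ===== LEMMAS AND PROOFS =====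

-- Σ |x - m| over a list of elements ≤ m.
lemma sum_abs_of_le (L : List Int) (m : Int) (h : ∀ x ∈ L, x ≤ m) :
    (L.map (fun v => |v - m|)).sum = (L.length : Int) * m - L.sum := by
  induction L with
  | nil => simp
  | cons a L ih =>
    have ha : a ≤ m := h a (by simp)
    have := ih (fun x hx => h x (by simp [hx]))
    simp only [List.map_cons, List.sum_cons, List.length_cons, this,
      abs_of_nonpos (by omega : a - m ≤ 0)]
    push_cast; ring

-- Σ |x - m| over a list of elements ≥ m.
lemma sum_abs_of_ge (R : List Int) (m : Int) (h : ∀ x ∈ R, m ≤ x) :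
    (R.map (fun v => |v - m|)).sum = R.sum - (R.length : Int) * m := by
  induction R with
  | nil => simp
  | cons a R ih =>
    have ha : m ≤ a := h a (by simp)
    have := ih (fun x hx => h x (by simp [hx]))
    simp only [List.map_cons, List.sum_cons, List.length_cons, this,
      abs_of_nonneg (by omega : 0 ≤ a - m)]
    push_cast; ring

-- The half-sum identity for a sorted nonempty list s, with lo = s[(m-1)/2]:
-- Σ_{v∈s} |v - lo| = Σ s[(m+1)/2:] - Σ s[:m/2].
lemma half_sum_identity (s : List Int) (hne : s ≠ [])
    (hmono : ∀ (p q : Nat) (hq : q < s.length) (hpq : p ≤ q),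
      s[p]'(Nat.lt_of_le_of_lt hpq hq) ≤ s[q]) :
    ∀ hj : (s.length - 1) / 2 < s.length,
    (s.map (fun v => |v - s[(s.length - 1) / 2]|)).sum
      = (s.drop ((s.length + 1) / 2)).sum - (s.take (s.length / 2)).sum := by
  intro hj
  have hm1 : 1 ≤ s.length := by
    cases s with
    | nil => exact absurd rfl hne
    | cons a t => simp
  set m := s.length with hm
  set j := (m - 1) / 2 with hjdef
  set t := m / 2 with htdef
  set lo := s[j]'hj with hlodef
  have hL : ∀ x ∈ s.take t, x ≤ lo := by
    intro x hx
    obtain ⟨i, hi, hxe⟩ := List.mem_iff_getElem.mp hx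
    have hi' : i < t := by rw [List.length_take] at hi; omega
    have hit : i < m := by omega
    have he : (s.take t)[i]'hi = s[i]'hit := List.getElem_take
    rw [← hxe, he, hlodef]
    exact hmono i j hj (by omega)
  have hR : ∀ x ∈ s.drop t, lo ≤ x := by
    intro x hx
    obtain ⟨i, hi, hxe⟩ := List.mem_iff_getElem.mp hx
    have hi' : t + i < m := by rw [List.length_drop] at hi; omega
    have he : (s.drop t)[i]'hi = s[t + i]'hi' := List.getElem_drop ..
    rw [← hxe, he, hlodef]
    exact hmono j (t + i) hi' (by omega)
  have hlen_take : (s.take t).length = t := by rw [List.length_take]; omega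
  have hlen_drop : (s.drop t).length = m - t := by rw [List.length_drop]
  have hsplit : s = s.take t ++ s.drop t := (List.take_append_drop t s).symm
  have hmain : (s.map (fun v => |v - lo|)).sum
      = (s.drop t).sum - (s.take t).sum + ((t : Int) - ((m - t : Nat) : Int)) * lo := by
    conv_lhs => rw [hsplit]
    rw [List.map_append, List.sum_append, sum_abs_of_le _ _ hL, sum_abs_of_ge _ _ hR,
      hlen_take, hlen_drop]
    ring
  rcases Nat.even_or_odd m with he | ho
  · -- m even: t = m/2, j = t-1, (m+1)/2 = t, coefficient 0
    obtain ⟨k, hk⟩ := he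
    have ht' : (m + 1) / 2 = t := by omega
    rw [ht', hmain]
    have hz : ((t : Int) - ((m - t : Nat) : Int)) = 0 := by push_cast; omega
    rw [hz]; ring
  · -- m odd: m = 2k+1, j = t = k, (m+1)/2 = k+1
    obtain ⟨k, hk⟩ := ho
    have ht : t = k := by omega
    have hjk : j = k := by omega
    have ht' : (m + 1) / 2 = k + 1 := by omega
    have hkm : k < m := by omega
    have hdropk : s.drop k = s[k]'hkm :: s.drop (k + 1) :=
      List.drop_eq_getElem_cons hkm
    have hsum : (s.drop t).sum = s[k]'hkm + (s.drop (k + 1)).sum := by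
      rw [ht, hdropk, List.sum_cons]
    have hlok : lo = s[k]'hkm := by rw [hlodef]; congr 1
    rw [ht', hmain, hsum]
    have hcoef : ((t : Int) - ((m - t : Nat) : Int)) = -1 := by push_cast; omega
    rw [hcoef, hlok, ht]
    ring

-- ===== VERDICT (by name: the statement is the Claim_ definition above) =====
theorem one_dim_min_and_count_spec : Claim_equal_one_dim_min_and_count := by
  intro vals _ hpre
  unfold Spec_one_dim_min_and_count one_dim_min_and_count one_dim_min_and_count_alt
  set s := PySem.List.sorted vals (fun x => x) false with hs
  have hne : s ≠ [] := by
    rw [hs, Ne, PySem.List.sorted_eq_nil_iff]; exact hpre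
  set m := s.length with hm
  have hm1 : 1 ≤ m := by
    cases hc : s with
    | nil => exact absurd hc hne
    | cons a t => rw [hm, hc]; simp
  have hmono : ∀ (p q : Nat) (hq : q < s.length) (hpq : p ≤ q),
      s[p]'(Nat.lt_of_le_of_lt hpq hq) ≤ s[q] := by
    intro p q hq hpq
    exact PySem.List.sorted_id_getElem_mono (xs := vals) hpq hq
  -- cast arithmetic: floordiv on nonneg casts to Nat division
  have hc1 : PySem.Int.floordiv ((m : Int) - 1) 2 = (((m - 1) / 2 : Nat) : Int) := by
    have : ((m : Int) - 1) = ((m - 1 : Nat) : Int) := by push_cast; omega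
    rw [this]; exact_mod_cast PySem.Int.floordiv_natCast (m - 1) 2
  have hc2 : PySem.Int.floordiv (m : Int) 2 = ((m / 2 : Nat) : Int) := by
    exact_mod_cast PySem.Int.floordiv_natCast m 2
  have hc3 : PySem.Int.floordiv ((m : Int) + 1) 2 = (((m + 1) / 2 : Nat) : Int) := by
    have : ((m : Int) + 1) = ((m + 1 : Nat) : Int) := by push_cast; omega
    rw [this]; exact_mod_cast PySem.Int.floordiv_natCast (m + 1) 2
  have hj : (m - 1) / 2 < m := by omega
  have ht : m / 2 < m := by omega
  have hgetj : PySem.List.pyGetD s (((m - 1) / 2 : Nat) : Int) 0 = s[(m - 1) / 2]'hj := by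
    rw [PySem.List.pyGetD_natCast, List.getD_eq_getElem s 0 hj]
  have hgett : PySem.List.pyGetD s ((m / 2 : Nat) : Int) 0 = s[m / 2]'ht := by
    rw [PySem.List.pyGetD_natCast, List.getD_eq_getElem s 0 ht]
  have hslice1 : PySem.List.slice s (some (((m + 1) / 2 : Nat) : Int)) none
      = s.drop ((m + 1) / 2) := PySem.List.slice_from_natCast ..
  have hslice2 : PySem.List.slice s none (some ((m / 2 : Nat) : Int))
      = s.take (m / 2) := PySem.List.slice_to_natCast ..
  simp only [← hm, hc1, hc2, hc3, hgetj, hgett, hslice1, hslice2]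
  have hfold : s.foldl (fun acc v => acc + |v - s[(m - 1) / 2]'hj|) 0
      = 0 + (s.map (fun v => |v - s[(m - 1) / 2]'hj|)).sum :=
    PySem.List.foldl_add _ _ _
  rw [hfold, zero_add, half_sum_identity s hne hmono hj]
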